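-- pv_equiv track=rewrite | github.com/omarsaqr12/structured_asic_project | eco_generator.py | count_used_logic_cells
-- ===== SOURCE A (Python) =====
-- from typing import Dict, List, Set, Any, Optional, Tuple
--
-- NON_LOGIC_CELL_TYPES = {
--     'sky130_fd_sc_hd__conb_1',           # Tie-high/tie-low cell
--     'sky130_fd_sc_hd__tapvpwrvgnd_1',    # Tap cell
--     'sky130_fd_sc_hd__decap_3',          # Decap cell
--     'sky130_fd_sc_hd__decap_4',          # Decap cell
--     'sky130_fd_sc_hd__dfbbp_1',          # DFF cell (sequential, not combinational logic)
--     'sky130_fd_sc_hd__fill_1',           # Fill cell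
-- }
--
-- def count_used_logic_cells(fabric_db: Dict[str, List[Dict[str, Any]]],
--                            used_slots: Set[str]) -> int:
--     """
--     Count all used logic cells in the fabric.
--
--     Args:
--         fabric_db: Fabric database from parse_fabric_cells
--         used_slots: Set of used fabric slot names
--
--     Returns:
--         Number of used logic cells
--     """
--     used_count = 0
--
--     # Iterate through ALL cell types in the fabric database
--     for cell_type, slots in fabric_db.items():
--         # Skip non-logic cell types (infrastructure cells)
--         if cell_type in NON_LOGIC_CELL_TYPES:
--             continue
--
--         # Count used slots of this cell type
--         for slot in slots:
--             if slot['name'] in used_slots: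
--                 used_count += 1
--
--     return used_count
-- ===== SOURCE B (Python) =====
-- from typing import Dict, List, Set, Any, Optional, Tuple
--
-- NON_LOGIC_CELL_TYPES = {
--     'sky130_fd_sc_hd__conb_1',
--     'sky130_fd_sc_hd__tapvpwrvgnd_1',
--     'sky130_fd_sc_hd__decap_3',
--     'sky130_fd_sc_hd__decap_4',
--     'sky130_fd_sc_hd__dfbbp_1',
--     'sky130_fd_sc_hd__fill_1',
-- }
--
-- def count_used_logic_cells(fabric_db: Dict[str, List[Dict[str, Any]]],
--                            used_slots: Set[str]) -> int:
--     # Build an occurrence index of logic slot names once, then sum lookups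
--     # over used_slots instead of testing membership inside the fabric scan.
--     logic_slot_counts: Dict[str, int] = {}
--     for cell_type, slots in fabric_db.items():
--         if cell_type in NON_LOGIC_CELL_TYPES:
--             continue
--         for slot in slots:
--             name = slot['name']
--             logic_slot_counts[name] = logic_slot_counts.get(name, 0) + 1
--     return sum(logic_slot_counts.get(name, 0) for name in used_slots)
-- ===== Notes on version B (the rewrite author's own statement) =====
-- stated objective: alternative
-- what changed: B builds an occurrence index (dict counter) of logic slot names in one fabric pass and then sums lookups over used_slots, instead of A's membership test against used_slots inside the fabric scan.
-- outside the precondition, e.g. on count_used_logic_cells({'t': [{}]}, {'x'}): A raises KeyError, B raises KeyError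
import Mathlib
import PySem

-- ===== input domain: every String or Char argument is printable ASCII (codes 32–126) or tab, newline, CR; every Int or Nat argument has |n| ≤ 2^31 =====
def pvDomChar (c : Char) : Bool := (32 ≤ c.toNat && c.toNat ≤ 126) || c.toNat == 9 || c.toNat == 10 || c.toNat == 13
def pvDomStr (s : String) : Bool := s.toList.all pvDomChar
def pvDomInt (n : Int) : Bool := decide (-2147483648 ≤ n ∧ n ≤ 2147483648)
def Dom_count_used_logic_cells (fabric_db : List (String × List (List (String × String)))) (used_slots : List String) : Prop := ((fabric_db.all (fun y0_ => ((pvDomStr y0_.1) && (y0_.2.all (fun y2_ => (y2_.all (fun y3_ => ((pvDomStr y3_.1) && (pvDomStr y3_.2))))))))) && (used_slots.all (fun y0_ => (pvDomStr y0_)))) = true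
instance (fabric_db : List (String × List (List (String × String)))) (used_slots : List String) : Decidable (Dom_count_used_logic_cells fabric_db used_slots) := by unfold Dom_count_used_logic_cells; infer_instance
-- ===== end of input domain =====

-- B replaces A's membership test inside the fabric scan by a counter of logic
-- slot names built once, summed over used_slots afterwards (objective: alternative).

-- ===== PORT A =====
def pvNonLogic : List String :=
  ["sky130_fd_sc_hd__conb_1", "sky130_fd_sc_hd__tapvpwrvgnd_1", "sky130_fd_sc_hd__decap_3",
   "sky130_fd_sc_hd__decap_4", "sky130_fd_sc_hd__dfbbp_1", "sky130_fd_sc_hd__fill_1"]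

-- slot['name'] raises KeyError when the key is missing; Pre_ excludes that, the
-- 'none' branch is unreachable inside Pre_.
def count_used_logic_cells (fabric_db : List (String × List (List (String × String)))) (used_slots : List String) : Int :=
  fabric_db.foldl (fun used_count p =>
    if pvNonLogic.contains p.1 then used_count
    else p.2.foldl (fun c slot =>
      match (PySem.Dict.mk slot).get? "name" with
      | some n => if used_slots.contains n then c + 1 else c
      | none => c) used_count) 0

-- ===== PORT B =====
-- logic_slot_counts, built once over the fabric (B's first phase)
def pvLogicSlotCounts (fabric_db : List (String × List (List (String × String)))) : PySem.Dict String Int :=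
  fabric_db.foldl (fun d p =>
    if pvNonLogic.contains p.1 then d
    else p.2.foldl (fun d slot =>
      match (PySem.Dict.mk slot).get? "name" with
      | some n => d.insert n (d.getD n 0 + 1)
      | none => d) d) PySem.Dict.empty

def count_used_logic_cells_alt (fabric_db : List (String × List (List (String × String)))) (used_slots : List String) : Int :=
  used_slots.foldl (fun s name => s + (pvLogicSlotCounts fabric_db).getD name 0) 0

-- ===== PRECONDITION & SPEC =====
-- Pre_ excludes assoc lists that do not represent a Python dict/set (duplicate
-- fabric_db keys, duplicate slot-dict keys, duplicate used_slots elements) and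
-- slots of logic cell types missing the 'name' key, on which A raises KeyError.
def Pre_count_used_logic_cells (fabric_db : List (String × List (List (String × String)))) (used_slots : List String) : Prop :=
  used_slots.Nodup ∧ (fabric_db.map Prod.fst).Nodup ∧
  ∀ p ∈ fabric_db, ∀ slot ∈ p.2,
    ((p.1 ∈ pvNonLogic) ∨ "name" ∈ slot.map Prod.fst) ∧ (slot.map Prod.fst).Nodup
instance (fabric_db : List (String × List (List (String × String)))) (used_slots : List String) : Decidable (Pre_count_used_logic_cells fabric_db used_slots) := by unfold Pre_count_used_logic_cells; infer_instance

def pvWitness_count_used_logic_cells : (List (String × List (List (String × String)))) × List String :=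
  ([("buf", [[("name", "s1")], [("name", "s2")]]), ("sky130_fd_sc_hd__fill_1", [[("name", "s1")]])], ["s1", "s3"])

def Spec_count_used_logic_cells (fabric_db : List (String × List (List (String × String)))) (used_slots : List String) (out : Int) : Prop := out = count_used_logic_cells_alt fabric_db used_slots
instance (fabric_db : List (String × List (List (String × String)))) (used_slots : List String) (out : Int) : Decidable (Spec_count_used_logic_cells fabric_db used_slots out) := by unfold Spec_count_used_logic_cells; infer_instance

-- ===== CLAIM (what is proved, stated in full; the proofs are below) =====
def Claim_equal_count_used_logic_cells : Prop := ∀ (fabric_db : List (String × List (List (String × String)))) (used_slots : List String), Dom_count_used_logic_cells fabric_db used_slots → Pre_count_used_logic_cells fabric_db used_slots → Spec_count_used_logic_cells fabric_db used_slots (count_used_logic_cells fabric_db used_slots)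

-- ===== LEMMAS AND PROOFS =====

-- names extracted from the slots of one cell type / of the whole (logic part of the) fabric
def pvNames (slots : List (List (String × String))) : List String :=
  slots.filterMap (fun slot => (PySem.Dict.mk slot).get? "name")

def pvAllNames (fabric_db : List (String × List (List (String × String)))) : List String :=
  (fabric_db.filter (fun p => !pvNonLogic.contains p.1)).flatMap (fun p => pvNames p.2)

theorem pvA_inner (us : List String) (slots : List (List (String × String))) (c : Int) :
    slots.foldl (fun c slot =>
      match (PySem.Dict.mk slot).get? "name" with
      | some n => if us.contains n then c + 1 else c
      | none => c) c
    = c + ((pvNames slots).countP (fun n => us.contains n) : Int) := by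
  induction slots generalizing c with
  | nil => simp [pvNames]
  | cons slot rest ih =>
    rw [List.foldl_cons]
    cases h : (PySem.Dict.mk slot).get? "name" with
    | none =>
      have hn : pvNames (slot :: rest) = pvNames rest := by
        simp [pvNames, List.filterMap_cons, h]
      rw [hn]; exact ih c
    | some n =>
      have hn : pvNames (slot :: rest) = n :: pvNames rest := by
        simp [pvNames, h]
      rw [hn, List.countP_cons]
      simp only [h]
      by_cases hc : us.contains n
      · rw [if_pos hc, ih (c + 1)]
        simp only [hc, if_true]
        push_cast; ring
      · rw [if_neg hc, ih c]
        simp only [hc, if_false]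
        push_cast; ring

theorem pvA_eq (fabric_db : List (String × List (List (String × String)))) (us : List String) :
    count_used_logic_cells fabric_db us
    = ((pvAllNames fabric_db).countP (fun n => us.contains n) : Int) := by
  unfold count_used_logic_cells
  suffices h : ∀ c : Int, fabric_db.foldl (fun used_count p =>
      if pvNonLogic.contains p.1 then used_count
      else p.2.foldl (fun c slot =>
        match (PySem.Dict.mk slot).get? "name" with
        | some n => if us.contains n then c + 1 else c
        | none => c) used_count) c
    = c + ((pvAllNames fabric_db).countP (fun n => us.contains n) : Int) by
    simpa using h 0
  induction fabric_db with
  | nil => simp [pvAllNames]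
  | cons p rest ih =>
    intro c
    rw [List.foldl_cons]
    by_cases hp : pvNonLogic.contains p.1
    · have hp' : p.1 ∈ pvNonLogic := by simpa [List.contains_eq_mem] using hp
      rw [if_pos hp, ih]
      have hA : pvAllNames (p :: rest) = pvAllNames rest := by
        simp [pvAllNames, List.filter_cons, hp']
      rw [hA]
    · rw [if_neg hp, pvA_inner us p.2 c, ih]
      have hp' : p.1 ∉ pvNonLogic := by simpa [List.contains_eq_mem] using hp
      have hA : pvAllNames (p :: rest) = pvNames p.2 ++ pvAllNames rest := by
        simp [pvAllNames, List.filter_cons, hp']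
      rw [hA, List.countP_append]
      push_cast; ring

theorem pvB_inner (slots : List (List (String × String))) (d : PySem.Dict String Int) :
    slots.foldl (fun d slot =>
      match (PySem.Dict.mk slot).get? "name" with
      | some n => d.insert n (d.getD n 0 + 1)
      | none => d) d
    = (pvNames slots).foldl (fun d n => d.insert n (d.getD n 0 + 1)) d := by
  induction slots generalizing d with
  | nil => simp [pvNames]
  | cons slot rest ih =>
    rw [List.foldl_cons]
    cases h : (PySem.Dict.mk slot).get? "name" with
    | none =>
      have hn : pvNames (slot :: rest) = pvNames rest := by
        simp [pvNames, List.filterMap_cons, h]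
      rw [hn]; simp only [h]; exact ih d
    | some n =>
      have hn : pvNames (slot :: rest) = n :: pvNames rest := by
        simp [pvNames, List.filterMap_cons, h]
      rw [hn]; simp only [h]
      rw [List.foldl_cons]
      exact ih (d.insert n (d.getD n 0 + 1))

theorem pvB_dict (fabric_db : List (String × List (List (String × String)))) (d : PySem.Dict String Int) :
    fabric_db.foldl (fun d p =>
      if pvNonLogic.contains p.1 then d
      else p.2.foldl (fun d slot =>
        match (PySem.Dict.mk slot).get? "name" with
        | some n => d.insert n (d.getD n 0 + 1)
        | none => d) d) d
    = (pvAllNames fabric_db).foldl (fun d n => d.insert n (d.getD n 0 + 1)) d := by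
  induction fabric_db generalizing d with
  | nil => simp [pvAllNames]
  | cons p rest ih =>
    rw [List.foldl_cons]
    by_cases hp : pvNonLogic.contains p.1
    · have hp' : p.1 ∈ pvNonLogic := by simpa [List.contains_eq_mem] using hp
      rw [if_pos hp, ih]
      have hA : pvAllNames (p :: rest) = pvAllNames rest := by
        simp [pvAllNames, List.filter_cons, hp']
      rw [hA]
    · rw [if_neg hp, pvB_inner p.2 d, ih]
      have hp' : p.1 ∉ pvNonLogic := by simpa [List.contains_eq_mem] using hp
      have hA : pvAllNames (p :: rest) = pvNames p.2 ++ pvAllNames rest := by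
        simp [pvAllNames, List.filter_cons, hp']
      rw [hA, List.foldl_append]

theorem pv_foldl_add (f : String → Int) (us : List String) (s : Int) :
    us.foldl (fun s u => s + f u) s = s + (us.map f).sum := by
  induction us generalizing s with
  | nil => simp
  | cons u rest ih => rw [List.foldl_cons, ih, List.map_cons, List.sum_cons]; ring

theorem pv_sum_indicator (us : List String) (hn : us.Nodup) (n : String) :
    (us.map fun u => if u = n then (1 : Int) else 0).sum
    = if us.contains n then (1 : Int) else 0 := by
  induction us with
  | nil => simp
  | cons u rest ih =>
    rcases List.nodup_cons.mp hn with ⟨hu, hrest⟩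
    rw [List.map_cons, List.sum_cons, ih hrest]
    by_cases he : u = n
    · subst he
      have : rest.contains u = false := by
        simp only [List.contains_eq_mem, decide_eq_false_iff_not]; exact hu
      simp [this, hu]
    · simp only [he, if_false, zero_add]
      have h' : ¬ n = u := fun hh => he hh.symm
      have : (u :: rest).contains n = rest.contains n := by
        simp [List.contains_eq_mem, h']
      rw [this]

theorem pv_map_add_sum (f g : String → Int) (us : List String) :
    (us.map fun u => f u + g u).sum = (us.map f).sum + (us.map g).sum := by
  induction us with
  | nil => simp
  | cons v vs ihv => simp only [List.map_cons, List.sum_cons, ihv]; ring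

theorem pv_sum_counts (us : List String) (hn : us.Nodup) (names : List String) :
    (us.map fun u => (names.count u : Int)).sum
    = ((names.countP (fun n => us.contains n)) : Int) := by
  induction names with
  | nil => simp
  | cons n rest ih =>
    have hsplit : (us.map fun u => ((n :: rest).count u : Int))
        = us.map fun u => (rest.count u : Int) + (if u = n then (1 : Int) else 0) := by
      apply List.map_congr_left
      intro u _
      rw [List.count_cons]
      by_cases he : u = n
      · simp [he]
      · have h' : ¬ n = u := fun hh => he hh.symm
        simp [he, h']
    rw [hsplit, List.countP_cons, pv_map_add_sum, ih, pv_sum_indicator us hn n]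
    by_cases hc : us.contains n <;> simp [hc]

-- ===== VERDICT (by name: the statement is the Claim_ definition above) =====
theorem count_used_logic_cells_spec : Claim_equal_count_used_logic_cells := by
  intro fabric_db us _ hpre
  unfold Spec_count_used_logic_cells
  rcases hpre with ⟨hnodup, -, -⟩
  rw [pvA_eq]
  unfold count_used_logic_cells_alt
  have hfun : (fun (s : Int) (name : String) => s + (pvLogicSlotCounts fabric_db).getD name 0)
      = fun (s : Int) (u : String) => s + ((pvAllNames fabric_db).count u : Int) := by
    funext s u
    rw [pvLogicSlotCounts, pvB_dict, PySem.Dict.getD_foldl_insert_add_one]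
    simp
  rw [hfun, pv_foldl_add, pv_sum_counts us hnodup]
  ring
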